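-- pv_equiv track=rewrite | github.com/pond-nj/slotted-egraphs | tmpTest/convert/prologToAST.py | groupLines
-- ===== SOURCE A (Python) =====
-- def groupLines(lines):
--     newLines = []
--     currLine = ""
--     for line in lines:
--         line = line.replace("\n", "")
--         for c in line:
--             if c == ".":
--                 newLines.append(currLine + c)
--                 currLine = ""
--             else:
--                 currLine += c
--     if currLine != "":
--         newLines.append(currLine)
--
--     return newLines
-- ===== SOURCE B (Python) =====
-- def groupLines(lines):
--     text = "".join(line.replace("\n", "") for line in lines)
--     parts = text.split(".")
--     res = [p + "." for p in parts[:-1]]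
--     if parts[-1] != "":
--         res.append(parts[-1])
--     return res
-- ===== Notes on version B (the rewrite author's own statement) =====
-- stated objective: faster
-- what changed: Replaced A's character-by-character accumulator loop over every line with a single join of the newline-stripped lines followed by str.split('.') and re-attaching the dot to each field, appending the trailing remainder only when non-empty.
import Mathlib
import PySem

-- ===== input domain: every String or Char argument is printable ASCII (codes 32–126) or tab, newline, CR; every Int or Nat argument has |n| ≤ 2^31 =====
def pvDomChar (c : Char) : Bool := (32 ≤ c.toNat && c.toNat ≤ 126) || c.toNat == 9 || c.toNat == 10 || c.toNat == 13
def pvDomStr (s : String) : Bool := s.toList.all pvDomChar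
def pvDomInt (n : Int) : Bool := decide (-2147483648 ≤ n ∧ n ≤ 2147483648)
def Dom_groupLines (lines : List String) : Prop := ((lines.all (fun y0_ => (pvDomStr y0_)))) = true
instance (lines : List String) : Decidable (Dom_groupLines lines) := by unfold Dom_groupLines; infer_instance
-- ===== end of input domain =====

-- B replaces A's per-character accumulator loop by join + split('.') + re-attaching the dot (objective: simpler).

-- ===== PORT A =====
-- the body of A's inner 'for c in line' loop; the running string currLine is carried as a List Char
def groupLinesStep (st : List String × List Char) (c : Char) : List String × List Char :=
  if c = '.' then (st.1 ++ [String.ofList (st.2 ++ [c])], [])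
  else (st.1, st.2 ++ [c])

def groupLines (lines : List String) : List String :=
  let st := lines.foldl
    (fun st line => (PySem.Chars.replace line.toList ['\n'] []).foldl groupLinesStep st)
    ([], [])
  if st.2 ≠ [] then st.1 ++ [String.ofList st.2] else st.1

-- ===== PORT B =====
def groupLines_alt (lines : List String) : List String :=
  let text := PySem.Chars.join [] (lines.map (fun line => PySem.Chars.replace line.toList ['\n'] []))
  let parts := PySem.Chars.splitOn text ['.']
  -- str.split always returns a nonempty list, so parts[-1] is parts.getLastD []
  (parts.dropLast.map (fun p => String.ofList (p ++ ['.']))) ++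
    (if parts.getLastD [] ≠ [] then [String.ofList (parts.getLastD [])] else [])

-- ===== PRECONDITION & SPEC =====
def Spec_groupLines (lines : List String) (out : List String) : Prop := out = groupLines_alt lines
instance (lines : List String) (out : List String) : Decidable (Spec_groupLines lines out) := by unfold Spec_groupLines; infer_instance

-- ===== CLAIM (what is proved, stated in full; the proofs are below) =====
def Claim_equal_groupLines : Prop := ∀ (lines : List String), Dom_groupLines lines → Spec_groupLines lines (groupLines lines)

-- ===== LEMMAS AND PROOFS =====

-- canonical split-on-'.' recursion both ports are reduced to
def splitDot : List Char → List (List Char)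
  | [] => [[]]
  | c :: rest => if c = '.' then [] :: splitDot rest else (splitDot rest).modifyHead (c :: ·)

lemma splitDot_ne_nil : ∀ (cs : List Char), splitDot cs ≠ []
  | [] => by simp [splitDot]
  | c :: rest => by
    have := splitDot_ne_nil rest
    simp only [splitDot]
    split_ifs
    · simp
    · cases h : splitDot rest with
      | nil => exact absurd h this
      | cons a b => simp [List.modifyHead]

lemma go_succ (c : Char) (rest cur : List Char) (acc : List (List Char)) (f : Nat) :
    PySem.Chars.splitOn.go ['.'] (f+1) (c :: rest) cur acc =
      if c = '.' then PySem.Chars.splitOn.go ['.'] f rest [] (cur.reverse :: acc)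
      else PySem.Chars.splitOn.go ['.'] f rest (c :: cur) acc := by
  by_cases hc : c = '.'
  · subst hc
    rw [if_pos rfl]
    simp [PySem.Chars.splitOn.go, List.isPrefixOf]
  · rw [if_neg hc]
    simp only [PySem.Chars.splitOn.go, List.isPrefixOf, Bool.and_true]
    rw [if_neg (by simpa using fun h => hc h.symm)]

lemma go_eq_splitDot : ∀ (cs : List Char) (fuel : Nat), cs.length ≤ fuel →
    ∀ (cur : List Char) (acc : List (List Char)),
    PySem.Chars.splitOn.go ['.'] fuel cs cur acc
      = acc.reverse ++ (splitDot cs).modifyHead (cur.reverse ++ ·) := by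
  intro cs
  induction cs with
  | nil =>
    intro fuel _ cur acc
    cases fuel <;> simp [PySem.Chars.splitOn.go, splitDot]
  | cons c rest ih =>
    intro fuel hf cur acc
    cases fuel with
    | zero => simp at hf
    | succ f =>
      have hf' : rest.length ≤ f := by simpa using hf
      rw [go_succ]
      obtain ⟨h, t, ht⟩ : ∃ h t, splitDot rest = h :: t := by
        cases hsp : splitDot rest with
        | nil => exact absurd hsp (splitDot_ne_nil rest)
        | cons h t => exact ⟨h, t, rfl⟩
      by_cases hc : c = '.'
      · subst hc
        rw [if_pos rfl, ih f hf' [] (cur.reverse :: acc)]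
        simp [splitDot, ht, List.modifyHead]
      · rw [if_neg hc, ih f hf' (c :: cur) acc]
        simp [splitDot, hc, ht, List.modifyHead]

lemma splitOn_dot_eq (cs : List Char) : PySem.Chars.splitOn cs ['.'] = splitDot cs := by
  unfold PySem.Chars.splitOn
  rw [go_eq_splitDot cs (cs.length + 1) (by omega) [] []]
  obtain ⟨h, t, ht⟩ : ∃ h t, splitDot cs = h :: t := by
    cases hsp : splitDot cs with
    | nil => exact absurd hsp (splitDot_ne_nil cs)
    | cons h t => exact ⟨h, t, rfl⟩
  simp [ht, List.modifyHead]

-- the inner character loop of A, characterised by splitDot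
lemma foldl_step_eq : ∀ (cs : List Char) (acc : List String) (cur : List Char),
    cs.foldl groupLinesStep (acc, cur)
      = (acc ++ (((splitDot cs).modifyHead (cur ++ ·)).dropLast.map (fun p => String.ofList (p ++ ['.']))),
         ((splitDot cs).modifyHead (cur ++ ·)).getLastD []) := by
  intro cs
  induction cs with
  | nil => intro acc cur; simp [splitDot, List.modifyHead]
  | cons c rest ih =>
    intro acc cur
    obtain ⟨h, t, ht⟩ : ∃ h t, splitDot rest = h :: t := by
      cases hsp : splitDot rest with
      | nil => exact absurd hsp (splitDot_ne_nil rest)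
      | cons h t => exact ⟨h, t, rfl⟩
    by_cases hc : c = '.'
    · subst hc
      simp only [List.foldl_cons, groupLinesStep]
      rw [if_pos trivial]
      rw [ih (acc ++ [String.ofList (cur ++ ['.'])]) []]
      simp [splitDot, ht, List.modifyHead, List.getLastD]
    · simp only [List.foldl_cons, groupLinesStep, if_neg hc]
      rw [ih acc (cur ++ [c])]
      simp [splitDot, hc, ht, List.modifyHead]

-- A's nested loops = the single character loop over the flattened text
lemma foldl_lines_eq (lines : List String) :
    ∀ (st : List String × List Char),
    lines.foldl (fun st line => (PySem.Chars.replace line.toList ['\n'] []).foldl groupLinesStep st) st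
      = ((lines.map (fun line => PySem.Chars.replace line.toList ['\n'] [])).flatten).foldl groupLinesStep st := by
  induction lines with
  | nil => intro st; simp
  | cons l rest ih => intro st; simp [List.foldl_append, ih]

lemma join_nil_eq_flatten (xs : List (List Char)) : PySem.Chars.join [] xs = xs.flatten := by
  unfold PySem.Chars.join
  induction xs with
  | nil => simp [List.intercalate]
  | cons h t ih =>
    cases t with
    | nil => simp [List.intercalate]
    | cons h2 t2 =>
      simp only [List.intercalate] at ih ⊢
      simp [List.intersperse] at ih ⊢
      exact ih

lemma modifyHead_nil_append (l : List (List Char)) : l.modifyHead (([] : List Char) ++ ·) = l := by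
  cases l <;> simp [List.modifyHead]

-- ===== VERDICT (by name: the statement is the Claim_ definition above) =====
theorem groupLines_spec : Claim_equal_groupLines := by
  intro lines _
  unfold Spec_groupLines groupLines groupLines_alt
  dsimp only
  rw [foldl_lines_eq, join_nil_eq_flatten, splitOn_dot_eq]
  set cs := (lines.map (fun line => PySem.Chars.replace line.toList ['\n'] [])).flatten with hcs
  rw [foldl_step_eq cs [] [], modifyHead_nil_append]
  simp only [List.nil_append]
  split_ifs <;> simp_all
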